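-- pv_equiv track=rewrite | github.com/nikoeremeev/GB_python_homework | task35.py | Get_massive
-- ===== SOURCE A (Python) =====
-- def Get_massive(n, rand):  # функция заполнения массива
--     a = []
--     for item in range(1, n+1):
--         if item != rand:
--             a.append(item)
--         else:
--             continue
--     return a
-- ===== SOURCE B (Python) =====
-- def Get_massive(n, rand):
--     # Build the whole list 1..n at once, then prune rand with a single guarded remove.
--     a = list(range(1, n + 1))
--     if rand in a:
--         a.remove(rand)
--     return a
-- ===== Notes on version B (the rewrite author's own statement) =====
-- stated objective: simpler
-- what changed: All-then-prune: build the whole list with one range() call and do a single guarded remove, instead of a per-element != branch while building.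
import Mathlib
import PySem

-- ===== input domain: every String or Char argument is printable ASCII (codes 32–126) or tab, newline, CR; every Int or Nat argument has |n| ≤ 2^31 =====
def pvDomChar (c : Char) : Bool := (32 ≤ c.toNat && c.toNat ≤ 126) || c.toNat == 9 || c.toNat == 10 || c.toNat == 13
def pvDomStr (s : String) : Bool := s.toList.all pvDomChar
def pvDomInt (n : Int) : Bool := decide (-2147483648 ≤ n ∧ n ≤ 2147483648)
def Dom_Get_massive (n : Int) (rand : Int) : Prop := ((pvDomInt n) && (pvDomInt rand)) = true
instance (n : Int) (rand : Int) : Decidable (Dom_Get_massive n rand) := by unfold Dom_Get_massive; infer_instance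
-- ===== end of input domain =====

-- B builds the whole range list at once and prunes rand with one guarded remove (simpler decomposition).


-- ===== PORT A =====
def Get_massive (n : Int) (rand : Int) : List Int :=
  (PySem.List.pyRange 1 (n + 1) 1).foldl
    (fun a item => if item ≠ rand then a ++ [item] else a) []

-- ===== PORT B =====
def Get_massive_alt (n : Int) (rand : Int) : List Int :=
  let a := PySem.List.pyRange 1 (n + 1) 1
  if rand ∈ a then (PySem.List.remove? a rand).getD a else a

-- ===== PRECONDITION & SPEC =====
def Spec_Get_massive (n : Int) (rand : Int) (out : List Int) : Prop := out = Get_massive_alt n rand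
instance (n : Int) (rand : Int) (out : List Int) : Decidable (Spec_Get_massive n rand out) := by unfold Spec_Get_massive; infer_instance

-- ===== CLAIM (what is proved, stated in full; the proofs are below) =====
def Claim_equal_Get_massive : Prop := ∀ (n : Int) (rand : Int), Dom_Get_massive n rand → Spec_Get_massive n rand (Get_massive n rand)

-- ===== LEMMAS AND PROOFS =====

theorem pv_eq (n rand : Int) : Get_massive n rand = Get_massive_alt n rand := by
  unfold Get_massive Get_massive_alt
  rw [PySem.List.foldl_append_ite_eq_filter]
  by_cases h : rand ∈ PySem.List.pyRange 1 (n + 1) 1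
  · rw [if_pos h, PySem.List.remove?_eq_some_erase _ _ h, Option.getD_some,
      (PySem.List.nodup_pyRange_one 1 (n + 1)).erase_eq_filter rand]
    exact List.filter_congr (fun x _ => by by_cases hx : x = rand <;> simp [hx])
  · rw [if_neg h, List.nil_append, List.filter_eq_self.mpr]
    intro x hx
    simp only [decide_eq_true_eq]
    exact fun hxr => h (hxr ▸ hx)

-- ===== VERDICT (by name: the statement is the Claim_ definition above) =====
theorem Get_massive_spec : Claim_equal_Get_massive := by
  intro n rand _
  exact pv_eq n rand
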